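-- pv_equiv track=rewrite | github.com/sosodennis/value-investment-agent | finance-agent-core/src/agents/fundamental/application/workflow_orchestrator/valuation_flow.py | _extract_horizon_token
-- ===== SOURCE A (Python) =====
-- def _extract_horizon_token(statement: str) -> str | None:
--     marker = "horizon="
--     start = statement.find(marker)
--     if start < 0:
--         return None
--     start += len(marker)
--     end_candidates = [statement.find(",", start), statement.find(")", start)]
--     ends = [value for value in end_candidates if value >= 0]
--     end = min(ends) if ends else len(statement)
--     token = statement[start:end]
--     normalized = token.strip().lower()
--     return normalized or None
-- ===== SOURCE B (Python) =====
-- def _extract_horizon_token(statement: str) -> str | None: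
--     # Split on the marker once, then take characters up to the first delimiter.
--     _head, sep, rest = statement.partition("horizon=")
--     if not sep:
--         return None
--     chars = []
--     for ch in rest:
--         if ch in ",)":
--             break
--         chars.append(ch)
--     normalized = "".join(chars).strip().lower()
--     return normalized or None
-- ===== Notes on version B (the rewrite author's own statement) =====
-- stated objective: idiomatic
-- what changed: Replaces A's find()+two delimiter-finds+min()+slicing arithmetic with a single partition on the marker followed by one take-characters-until-delimiter pass.
import Mathlib
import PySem

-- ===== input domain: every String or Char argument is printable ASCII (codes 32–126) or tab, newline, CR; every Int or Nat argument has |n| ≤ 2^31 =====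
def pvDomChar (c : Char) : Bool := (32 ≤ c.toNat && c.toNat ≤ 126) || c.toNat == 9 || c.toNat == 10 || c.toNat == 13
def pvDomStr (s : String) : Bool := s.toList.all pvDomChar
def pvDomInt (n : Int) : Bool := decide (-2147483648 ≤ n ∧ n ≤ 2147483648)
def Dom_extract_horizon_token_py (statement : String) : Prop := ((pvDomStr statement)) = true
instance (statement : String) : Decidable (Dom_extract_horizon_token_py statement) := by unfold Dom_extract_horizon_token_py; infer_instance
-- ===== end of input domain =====

-- B replaces A's marker find + two delimiter finds + min() + slicing by one partition and a
-- single take-up-to-delimiter pass (objective: idiomatic; no speed claim).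

-- ===== PORT A =====
def extract_horizon_token_py (statement : String) : Option String :=
  let marker := "horizon="
  let start := PySem.Str.find statement marker
  if start < 0 then none
  else
    let start := start + (PySem.Str.len marker : Int)
    let end_candidates : List Int :=
      [PySem.Str.findFrom statement "," start, PySem.Str.findFrom statement ")" start]
    let ends := end_candidates.filter (fun v => 0 ≤ v)
    let end_ : Int :=
      match PySem.List.min? ends (fun v => v) with
      | some m => m
      | none => (PySem.Str.len statement : Int)
    let token := PySem.Str.slice statement (some start) (some end_)
    let normalized := PySem.Str.lower (PySem.Str.strip token)
    if normalized = "" then none else some normalized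

-- ===== PORT B =====
-- statement.partition("horizon=")'s tail (none when the marker is absent)
def pvAfterMarker : List Char → Option (List Char)
  | [] => none
  | c :: t =>
      if (c :: t).take 8 = "horizon=".toList then some ((c :: t).drop 8)
      else pvAfterMarker t

def extract_horizon_token_py_alt (statement : String) : Option String :=
  match pvAfterMarker statement.toList with
  | none => none
  | some rest =>
      let chars := rest.takeWhile (fun ch => !(ch == ',' || ch == ')'))
      let normalized := PySem.Chars.lower (PySem.Chars.strip chars)
      if normalized.isEmpty then none else some (String.ofList normalized)

-- ===== PRECONDITION & SPEC =====
def Spec_extract_horizon_token_py (statement : String) (out : Option String) : Prop := out = extract_horizon_token_py_alt statement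
instance (statement : String) (out : Option String) : Decidable (Spec_extract_horizon_token_py statement out) := by unfold Spec_extract_horizon_token_py; infer_instance

-- ===== CLAIM (what is proved, stated in full; the proofs are below) =====
def Claim_equal_extract_horizon_token_py : Prop := ∀ (statement : String), Dom_extract_horizon_token_py statement → Spec_extract_horizon_token_py statement (extract_horizon_token_py statement)


-- ===== LEMMAS AND PROOFS =====

-- the marker as a character list
def pvMarker : List Char := "horizon=".toList

theorem pvMarker_len : pvMarker.length = 8 := by decide

-- pvAfterMarker misses exactly when the marker is not an infix
theorem pvAfterMarker_eq_none (l : List Char) (h : ¬ pvMarker <:+: l) :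
    pvAfterMarker l = none := by
  induction l with
  | nil => rfl
  | cons a t ih =>
      rw [pvAfterMarker]
      have hpre : ¬ (a :: t).take 8 = pvMarker := by
        intro hEq
        exact h (List.IsPrefix.isInfix
          (by rw [List.prefix_iff_eq_take, pvMarker_len]; exact hEq.symm))
      rw [if_neg (by simpa [pvMarker] using hpre)]
      exact ih (fun hinf => h (hinf.trans ((List.suffix_cons a t).isInfix)))

-- pvAfterMarker returns the tail after the FIRST occurrence of the marker
theorem pvAfterMarker_eq_some (l : List Char) (j : Nat)
    (hpre : pvMarker <+: l.drop j)
    (hmin : ∀ i, i < j → ¬ pvMarker <+: l.drop i) :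
    pvAfterMarker l = some (l.drop (j + 8)) := by
  induction l generalizing j with
  | nil =>
      exfalso
      have := hpre.length_le
      simp [pvMarker_len] at this
  | cons a t ih =>
      cases j with
      | zero =>
          have htake : (a :: t).take 8 = pvMarker := by
            have := (List.prefix_iff_eq_take.mp (by simpa using hpre))
            rw [pvMarker_len] at this
            exact this.symm
          rw [pvAfterMarker, if_pos (by simpa [pvMarker] using htake)]
      | succ k =>
          have hnot : ¬ (a :: t).take 8 = pvMarker := by
            intro hEq
            exact hmin 0 (by omega)
              (by simpa using (List.prefix_iff_eq_take.mpr (by rw [pvMarker_len]; exact hEq.symm)))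
          rw [pvAfterMarker, if_neg (by simpa [pvMarker] using hnot)]
          have := ih k (by simpa using hpre)
            (fun i hi => by simpa using hmin (i + 1) (by omega))
          simpa using this

-- a singleton list is a prefix of l.drop i iff l[i]? is that character
theorem pvSingleton_prefix_iff (c : Char) (l : List Char) (i : Nat) :
    [c] <+: l.drop i ↔ l[i]? = some c := by
  rw [← List.head?_drop]
  constructor
  · rintro ⟨t, ht⟩
    rw [← ht]; rfl
  · intro h
    cases hd : l.drop i with
    | nil => rw [hd] at h; simp at h
    | cons b t =>
        rw [hd] at h
        simp at h
        exact ⟨t, by rw [h]; rfl⟩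

-- takeWhile as take-up-to-the-first-failure
theorem pvTakeWhile_eq_take (p : Char → Bool) :
    ∀ (l : List Char) (n : Nat),
    (∀ i, i < n → ∀ c, l[i]? = some c → p c = true) →
    (∀ c, l[n]? = some c → p c = false) →
    l.takeWhile p = l.take n := by
  intro l
  induction l with
  | nil => intro n _ _; simp
  | cons a t ih =>
      intro n h1 h2
      cases n with
      | zero =>
          have hpa : p a = false := h2 a (by simp)
          simp [hpa]
      | succ k =>
          have hpa : p a = true := h1 0 (by omega) a (by simp)
          simp only [List.takeWhile_cons, hpa, if_true, List.take_succ_cons]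
          rw [ih k (fun i hi c hc => h1 (i + 1) (by omega) c (by simpa using hc))
                (fun c hc => h2 c (by simpa using hc))]

-- delimiter predicate of B
theorem pvDelim_true_iff (c : Char) :
    (!(c == ',' || c == ')')) = true ↔ c ≠ ',' ∧ c ≠ ')' := by
  cases h1 : c == ','
  · cases h2 : c == ')'
    · simp_all
    · simp_all
  · simp_all

-- no occurrence of character c anywhere (from find = -1)
theorem pvNoOcc (c : Char) (l : List Char) (h : PySem.Chars.find l [c] = -1) :
    ∀ (i : Nat) (d : Char), l[i]? = some d → d ≠ c := by
  intro i d hd hdc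
  subst hdc
  have hninf := (PySem.Chars.find_eq_neg_one_iff l [d]).mp h
  have : PySem.Chars.isIn [d] l = true :=
    (PySem.Chars.exists_prefix_drop_iff_isIn [d] l).mp ⟨i, (pvSingleton_prefix_iff d l i).mpr hd⟩
  exact hninf ((PySem.Chars.isIn_iff_infix [d] l).mp this)

-- first occurrence of character c (from find = some nonneg value)
theorem pvFirstOcc (c : Char) (l : List Char) (h : PySem.Chars.find l [c] ≠ -1) :
    l[(PySem.Chars.find l [c]).toNat]? = some c ∧
    ∀ i, i < (PySem.Chars.find l [c]).toNat → ∀ d, l[i]? = some d → d ≠ c := by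
  have hge : 0 ≤ PySem.Chars.find l [c] := by
    have := PySem.Chars.neg_one_le_find (s := l) (sub := [c])
    omega
  obtain ⟨hp, hm⟩ := PySem.Chars.find_spec (s := l) (sub := [c]) hge
  refine ⟨(pvSingleton_prefix_iff c l _).mp hp, ?_⟩
  intro i hi d hd hdc
  subst hdc
  exact hm i hi ((pvSingleton_prefix_iff d l i).mpr hd)

-- finishing step: equal normalized lists give equal results
theorem pvFinalize (t : String) (cs : List Char) (h : t.toList = cs) :
    (if t = "" then none else some t) =
      (if cs.isEmpty then none else some (String.ofList cs)) := by
  subst h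
  by_cases he : t = ""
  · simp [he]
  · rw [if_neg he, if_neg (by simpa [List.isEmpty_iff, ← String.toList_eq_nil_iff] using he)]
    simp


-- p rejects exactly the two delimiters
theorem pvDelim_comma : (!((',' : Char) == ',' || (',' : Char) == ')')) = false := by decide
theorem pvDelim_paren : (!((')' : Char) == ',' || (')' : Char) == ')')) = false := by decide

-- A's end computation produces exactly B's take-up-to-delimiter slice
theorem pvCore (l : List Char) (k : Nat) (hk : k ≤ l.length) :
    PySem.List.slice l (some (k : Int)) (some (
      match PySem.List.min? (([PySem.Chars.findFrom l [','] (k : Int),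
                               PySem.Chars.findFrom l [')'] (k : Int)]).filter (fun v => 0 ≤ v))
              (fun v => v) with
      | some m => m
      | none => (l.length : Int)))
    = (l.drop k).takeWhile (fun ch => !(ch == ',' || ch == ')')) := by
  rw [PySem.Chars.findFrom_natCast l [','] k hk, PySem.Chars.findFrom_natCast l [')'] k hk]
  by_cases h1 : PySem.Chars.find (l.drop k) [','] = -1 <;>
    by_cases h2 : PySem.Chars.find (l.drop k) [')'] = -1
  · -- neither delimiter occurs: token runs to the end of the string
    rw [if_pos h1, if_pos h2]
    have hfilter : (([(-1 : Int), -1]).filter (fun v => decide (0 ≤ v))) = [] := by decide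
    rw [hfilter, (PySem.List.min?_eq_none_iff _ _).mpr rfl]
    rw [PySem.List.slice_natCast l k l.length]
    rw [pvTakeWhile_eq_take _ (List.drop k l) (l.length - k)
      (fun i _ c hc => (pvDelim_true_iff c).mpr
        ⟨pvNoOcc ',' _ h1 i c hc, pvNoOcc ')' _ h2 i c hc⟩)
      (fun c hc => by rw [List.getElem?_eq_none (by simp)] at hc; cases hc)]
  · -- only ')' occurs
    rw [if_pos h1, if_neg h2]
    have h02 : 0 ≤ PySem.Chars.find (l.drop k) [')'] := by
      have := PySem.Chars.neg_one_le_find (l.drop k) [')']; omega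
    obtain ⟨hat, hbefore⟩ := pvFirstOcc ')' (l.drop k) h2
    have hfilter : List.filter (fun v => decide (0 ≤ v))
        [(-1 : Int), ↑k + PySem.Chars.find (l.drop k) [')']]
        = [↑k + PySem.Chars.find (l.drop k) [')']] := by
      simp; omega
    rw [hfilter, PySem.List.min?_id_cons]
    have hend : (↑k + PySem.Chars.find (l.drop k) [')'] : Int)
        = ((k + (PySem.Chars.find (l.drop k) [')']).toNat : Nat) : Int) := by omega
    simp only [List.foldl_nil, hend]
    rw [PySem.List.slice_natCast l k _]
    rw [pvTakeWhile_eq_take _ (List.drop k l) ((PySem.Chars.find (l.drop k) [')']).toNat)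
      (fun i hi c hc => (pvDelim_true_iff c).mpr
        ⟨pvNoOcc ',' _ h1 i c hc, hbefore i hi c hc⟩)
      (fun c hc => by rw [hat] at hc; cases hc; exact pvDelim_paren)]
    congr 1
    omega
  · -- only ',' occurs
    rw [if_neg h1, if_pos h2]
    have h01 : 0 ≤ PySem.Chars.find (l.drop k) [','] := by
      have := PySem.Chars.neg_one_le_find (l.drop k) [',']; omega
    obtain ⟨hat, hbefore⟩ := pvFirstOcc ',' (l.drop k) h1
    have hfilter : List.filter (fun v => decide (0 ≤ v))
        [↑k + PySem.Chars.find (l.drop k) [','], (-1 : Int)]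
        = [↑k + PySem.Chars.find (l.drop k) [',']] := by
      simp [List.filter_cons]; omega
    rw [hfilter, PySem.List.min?_id_cons]
    have hend : (↑k + PySem.Chars.find (l.drop k) [','] : Int)
        = ((k + (PySem.Chars.find (l.drop k) [',']).toNat : Nat) : Int) := by omega
    simp only [List.foldl_nil, hend]
    rw [PySem.List.slice_natCast l k _]
    rw [pvTakeWhile_eq_take _ (List.drop k l) ((PySem.Chars.find (l.drop k) [',']).toNat)
      (fun i hi c hc => (pvDelim_true_iff c).mpr
        ⟨hbefore i hi c hc, pvNoOcc ')' _ h2 i c hc⟩)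
      (fun c hc => by rw [hat] at hc; cases hc; exact pvDelim_comma)]
    congr 1
    omega
  · -- both occur: the earlier one ends the token
    rw [if_neg h1, if_neg h2]
    have h01 : 0 ≤ PySem.Chars.find (l.drop k) [','] := by
      have := PySem.Chars.neg_one_le_find (l.drop k) [',']; omega
    have h02 : 0 ≤ PySem.Chars.find (l.drop k) [')'] := by
      have := PySem.Chars.neg_one_le_find (l.drop k) [')']; omega
    obtain ⟨hat1, hbefore1⟩ := pvFirstOcc ',' (l.drop k) h1
    obtain ⟨hat2, hbefore2⟩ := pvFirstOcc ')' (l.drop k) h2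
    have hfilter : List.filter (fun v => decide (0 ≤ v))
        [↑k + PySem.Chars.find (l.drop k) [','], ↑k + PySem.Chars.find (l.drop k) [')']]
        = [↑k + PySem.Chars.find (l.drop k) [','], ↑k + PySem.Chars.find (l.drop k) [')']] := by
      simp; constructor <;> omega
    rw [hfilter, PySem.List.min?_id_cons]
    have hend : List.foldl min (↑k + PySem.Chars.find (l.drop k) [','])
          [↑k + PySem.Chars.find (l.drop k) [')']]
        = ((k + min (PySem.Chars.find (l.drop k) [',']).toNat
                    (PySem.Chars.find (l.drop k) [')']).toNat : Nat) : Int) := by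
      simp only [List.foldl_cons, List.foldl_nil]
      omega
    rw [hend, PySem.List.slice_natCast l k _]
    rw [pvTakeWhile_eq_take _ (List.drop k l)
        (min (PySem.Chars.find (l.drop k) [',']).toNat (PySem.Chars.find (l.drop k) [')']).toNat)
      (fun i hi c hc => (pvDelim_true_iff c).mpr
        ⟨hbefore1 i (by omega) c hc, hbefore2 i (by omega) c hc⟩)
      (fun c hc => by
        rcases Nat.le_total (PySem.Chars.find (l.drop k) [',']).toNat
            (PySem.Chars.find (l.drop k) [')']).toNat with hle | hle
        · rw [Nat.min_eq_left hle, hat1] at hc; cases hc; exact pvDelim_comma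
        · rw [Nat.min_eq_right hle, hat2] at hc; cases hc; exact pvDelim_paren)]
    congr 1
    omega

theorem pvMain (s : String) :
    extract_horizon_token_py s = extract_horizon_token_py_alt s := by
  by_cases hf : PySem.Chars.find s.toList pvMarker = -1
  · have hb : pvAfterMarker s.toList = none :=
      pvAfterMarker_eq_none _ ((PySem.Chars.find_eq_neg_one_iff _ _).mp hf)
    simp only [extract_horizon_token_py, extract_horizon_token_py_alt, hb]
    have hfs : PySem.Str.find s "horizon=" = -1 := by simpa [pvMarker] using hf
    rw [if_pos (by rw [hfs]; norm_num)]
  · have h0 : 0 ≤ PySem.Chars.find s.toList pvMarker := by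
      have := PySem.Chars.neg_one_le_find s.toList pvMarker; omega
    obtain ⟨hpre, hmin⟩ := PySem.Chars.find_spec (s := s.toList) (sub := pvMarker) h0
    have hlen : (PySem.Chars.find s.toList pvMarker).toNat + 8 ≤ s.toList.length := by
      have h8 := hpre.length_le
      rw [pvMarker_len, List.length_drop] at h8
      omega
    have hafter : pvAfterMarker s.toList =
        some (s.toList.drop ((PySem.Chars.find s.toList pvMarker).toNat + 8)) :=
      pvAfterMarker_eq_some _ _ hpre hmin
    have hcore := pvCore s.toList ((PySem.Chars.find s.toList pvMarker).toNat + 8) hlen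
    simp only [extract_horizon_token_py, extract_horizon_token_py_alt, hafter]
    have hfs : PySem.Str.find s "horizon=" = ((PySem.Chars.find s.toList pvMarker).toNat : Int) := by
      have h' : PySem.Chars.find s.toList pvMarker
          = ((PySem.Chars.find s.toList pvMarker).toNat : Int) := by omega
      simpa [pvMarker] using h'
    rw [hfs, show PySem.Str.len "horizon=" = 8 from by decide]
    rw [if_neg (by omega : ¬ (((PySem.Chars.find s.toList pvMarker).toNat : Int) < 0))]
    refine pvFinalize _ _ ?_
    push_cast at hcore
    simp only [PySem.Str.toList_lower, PySem.Str.toList_strip, PySem.Str.toList_slice,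
      PySem.Chars.slice_eq_listSlice, PySem.Str.findFrom_eq, PySem.Str.len_eq,
      show (",".toList) = [','] from rfl, show (")".toList) = [')'] from rfl]
    exact congrArg (fun t => PySem.Chars.lower (PySem.Chars.strip t)) hcore

-- ===== VERDICT (by name: the statement is the Claim_ definition above) =====
theorem extract_horizon_token_py_spec : Claim_equal_extract_horizon_token_py := by
  intro s _
  unfold Spec_extract_horizon_token_py
  exact pvMain s
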